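-- pv_equiv track=rewrite | github.com/Me3sP/bluez-dubbing | apps/backend/services/orchestrator/media_processing/subtitles_handling.py | _balance_lines
-- ===== SOURCE A (Python) =====
-- from typing import List, Optional, Literal, Tuple
--
-- def _balance_lines(l1: List[str], l2: List[str]) -> Tuple[List[str], List[str]]:
--     """
--     Move last word(s) from line 1 to line 2 to balance lengths.
--     """
--     def L(s: List[str]) -> int:
--         return len(" ".join(s)) if s else 0
--
--     s1, s2 = L(l1), L(l2)
--     while l2 is not None and (s1 - s2) > 6 and len(l1) > 1:
--         w = l1.pop()
--         l2.insert(0, w)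
--         s1, s2 = L(l1), L(l2)
--     return l1, l2
-- ===== SOURCE B (Python) =====
-- def _balance_lines(l1, l2):
--     # Maintain the joined lengths incrementally and find the cut
--     # index k, then move the tail words in one slice (same in-place effect).
--     s1 = sum(map(len, l1)) + max(len(l1) - 1, 0)
--     s2 = sum(map(len, l2)) + max(len(l2) - 1, 0)
--     k = len(l1)
--     moved = []
--     while s1 - s2 > 6 and k > 1:
--         w = l1[k - 1]
--         s1 -= len(w) + 1
--         s2 += len(w) + (1 if (moved or l2) else 0)
--         moved.append(w)
--         k -= 1
--     moved.reverse()
--     l1[:] = l1[:k]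
--     l2[:] = moved + l2
--     return l1, l2
-- ===== Notes on version B (the rewrite author's own statement) =====
-- stated objective: alternative
-- what changed: Instead of re-joining both lines after every moved word, B maintains both joined lengths incrementally (+-len(word)+-1), finds the cut index in one backward scan and moves the tail in a single slice; it avoids A's per-iteration re-joins but was not measurably faster on the generated inputs.
import Mathlib
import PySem

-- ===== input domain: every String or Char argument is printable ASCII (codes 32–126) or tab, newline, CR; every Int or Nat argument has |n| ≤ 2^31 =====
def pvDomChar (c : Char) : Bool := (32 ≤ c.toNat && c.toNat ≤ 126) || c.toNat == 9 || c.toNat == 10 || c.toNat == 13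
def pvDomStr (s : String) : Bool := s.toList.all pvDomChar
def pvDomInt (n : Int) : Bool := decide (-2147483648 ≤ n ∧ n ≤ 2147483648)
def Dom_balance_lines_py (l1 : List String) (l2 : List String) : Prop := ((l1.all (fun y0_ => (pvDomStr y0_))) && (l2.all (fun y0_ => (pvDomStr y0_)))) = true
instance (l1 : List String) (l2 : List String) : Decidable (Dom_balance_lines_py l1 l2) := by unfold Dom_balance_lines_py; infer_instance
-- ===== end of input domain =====

-- B replaces A's re-join of both lines on every iteration by incrementally
-- updated joined lengths and a single final slice (objective: alternative; both
-- programs mutate l1/l2 in place identically, the theorem is about the return value).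


-- ===== PORT A =====
-- L(s) = len(" ".join(s)) if s else 0
def pvL (s : List String) : Int :=
  if s = [] then 0 else PySem.Str.len (PySem.Str.join " " s)

-- the while loop: pop last word of l1, insert it at the front of l2, recompute L.
-- ('l2 is not None' is always true for a list argument and is dropped.)
def pvALoop (l1 l2 : List String) : List String × List String :=
  if pvL l1 - pvL l2 > 6 ∧ l1.length > 1 then
    pvALoop l1.dropLast ((l1.getLast?.getD "") :: l2)
  else (l1, l2)
termination_by l1.length
decreasing_by
  rename_i h
  simpa using Nat.pred_lt (by omega)

def balance_lines_py (l1 : List String) (l2 : List String) : List String × List String :=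
  pvALoop l1 l2

-- ===== PORT B =====
-- B's while loop: s1, s2 are the incrementally maintained joined lengths,
-- k the number of words kept on line 1, moved the words taken off (in pop order).
def pvBLoop (l1 : List String) (l2ne : Bool) (s1 s2 : Int) (k : Nat) (moved : List String) :
    Nat × List String :=
  if s1 - s2 > 6 ∧ k > 1 then
    let w := (PySem.List.pyGet? l1 ((k : Int) - 1)).getD ""
    pvBLoop l1 l2ne (s1 - (PySem.Str.len w + 1))
      (s2 + PySem.Str.len w + (if moved ≠ [] ∨ l2ne = true then 1 else 0))
      (k - 1) (moved ++ [w])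
  else (k, moved)
termination_by k

def balance_lines_py_alt (l1 : List String) (l2 : List String) : List String × List String :=
  let s1 : Int := (l1.map PySem.Str.len).sum + max ((l1.length : Int) - 1) 0
  let s2 : Int := (l2.map PySem.Str.len).sum + max ((l2.length : Int) - 1) 0
  let r := pvBLoop l1 (!l2.isEmpty) s1 s2 l1.length []
  (l1.take r.1, r.2.reverse ++ l2)

-- ===== PRECONDITION & SPEC =====
def Spec_balance_lines_py (l1 : List String) (l2 : List String) (out : List String × List String) : Prop := out = balance_lines_py_alt l1 l2
instance (l1 : List String) (l2 : List String) (out : List String × List String) : Decidable (Spec_balance_lines_py l1 l2 out) := by unfold Spec_balance_lines_py; infer_instance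

-- ===== CLAIM (what is proved, stated in full; the proofs are below) =====
def Claim_equal_balance_lines_py : Prop := ∀ (l1 : List String) (l2 : List String), Dom_balance_lines_py l1 l2 → Spec_balance_lines_py l1 l2 (balance_lines_py l1 l2)

-- ===== LEMMAS AND PROOFS =====

-- closed form of the joined length at the character-list level
theorem joinLenC : ∀ (a : List Char) (rest : List (List Char)),
    (PySem.Chars.join [' '] (a :: rest)).length
      = a.length + rest.length + (rest.map List.length).sum := by
  intro a rest
  induction rest generalizing a with
  | nil => simp [PySem.Chars.join_singleton]
  | cons b rest ih =>
      rw [PySem.Chars.join_cons_cons]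
      simp only [List.length_append, ih b]
      simp
      omega

-- closed form of A's L: sum of word lengths plus (count - 1) separators
theorem pvL_eq (s : List String) :
    pvL s = (s.map PySem.Str.len).sum + max ((s.length : Int) - 1) 0 := by
  cases s with
  | nil => simp [pvL]
  | cons a rest =>
      have hsum : ∀ t : List String,
          (t.map PySem.Str.len).sum = ((t.map (List.length ∘ String.toList)).sum : Int) := by
        intro t
        induction t with
        | nil => simp
        | cons x t ih => simp [ih, PySem.Str.len]
      simp only [pvL, if_neg (by simp : ¬ (a :: rest : List String) = [])]
      have hjl : PySem.Str.len (PySem.Str.join " " (a :: rest))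
          = ((PySem.Str.join " " (a :: rest)).toList.length : Int) := by
        simp [PySem.Str.len]
      have hla : PySem.Str.len a = (a.toList.length : Int) := by
        simp [PySem.Str.len]
      rw [hjl, PySem.Str.toList_join]
      have hsep : (" " : String).toList = [' '] := rfl
      rw [hsep]
      simp only [List.map_cons]
      rw [joinLenC]
      simp only [List.sum_cons, List.length_map, List.map_map, List.length_cons]
      rw [hsum, hla]
      push_cast
      omega

-- the two loops agree, under the invariant that s1/s2 are the true joined lengths
theorem loop_eq (l1 l2 : List String) :
    ∀ (k : Nat) (moved : List String), k ≤ l1.length →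
      pvALoop (l1.take k) (moved.reverse ++ l2) =
        (l1.take (pvBLoop l1 (!l2.isEmpty) (pvL (l1.take k)) (pvL (moved.reverse ++ l2)) k moved).1,
         (pvBLoop l1 (!l2.isEmpty) (pvL (l1.take k)) (pvL (moved.reverse ++ l2)) k moved).2.reverse ++ l2) := by
  intro k
  induction k with
  | zero =>
      intro moved hk
      rw [pvALoop, pvBLoop]
      simp
  | succ k ih =>
      intro moved hk
      have hkl : k < l1.length := by omega
      rw [pvALoop, pvBLoop]
      have hlen : (l1.take (k+1)).length = k + 1 := by
        simp [List.length_take]; omega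
      rw [hlen]
      by_cases h : pvL (l1.take (k+1)) - pvL (moved.reverse ++ l2) > 6 ∧ k + 1 > 1
      case neg => rw [if_neg h, if_neg h]
      rw [if_pos h, if_pos h]
      have hk1 : 1 ≤ k := by omega
      have hwB : (PySem.List.pyGet? l1 (((k+1 : Nat) : Int) - 1)).getD "" = l1[k] := by
        have hc : (((k+1 : Nat) : Int) - 1) = ((k : Nat) : Int) := by push_cast; ring
        rw [hc, PySem.List.pyGet?_natCast]
        simp [List.getElem?_eq_getElem hkl]
      have htake : l1.take (k+1) = l1.take k ++ [l1[k]] := by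
        rw [List.take_add_one]; simp [List.getElem?_eq_getElem hkl]
      have hwA : (l1.take (k+1)).getLast?.getD "" = l1[k] := by
        rw [htake, List.getLast?_concat]; rfl
      have hdrop : (l1.take (k+1)).dropLast = l1.take k := by
        rw [htake, List.dropLast_concat]
      have hsum1 : ((l1.take (k+1)).map PySem.Str.len).sum
          = ((l1.take k).map PySem.Str.len).sum + PySem.Str.len l1[k] := by
        rw [htake, List.map_append, List.sum_append]
        simp [PySem.Str.len]
      have hlk : (l1.take k).length = k := by
        simp [List.length_take]; omega
      have h1 : pvL (l1.take (k+1)) - (PySem.Str.len l1[k] + 1) = pvL (l1.take k) := by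
        rw [pvL_eq, pvL_eq, hsum1, hlen, hlk]
        push_cast
        omega
      have h2 : pvL (moved.reverse ++ l2) + PySem.Str.len l1[k]
            + (if moved ≠ [] ∨ (!l2.isEmpty) = true then 1 else 0)
          = pvL (l1[k] :: (moved.reverse ++ l2)) := by
        rw [pvL_eq, pvL_eq]
        have hne : (moved ≠ [] ∨ (!l2.isEmpty) = true) ↔ 1 ≤ (moved.reverse ++ l2).length := by
          cases moved <;> cases l2 <;> simp <;> omega
        by_cases hc : moved ≠ [] ∨ (!l2.isEmpty) = true
        · rw [if_pos hc]
          have hge := hne.mp hc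
          simp only [List.map_cons, List.sum_cons, List.length_cons]
          push_cast
          omega
        · rw [if_neg hc]
          have hlt : ¬ 1 ≤ (moved.reverse ++ l2).length := fun hh => hc (hne.mpr hh)
          simp only [List.map_cons, List.sum_cons, List.length_cons]
          push_cast
          omega
      rw [hdrop, hwA]
      simp only [hwB, Nat.add_sub_cancel]
      have harg2 : l1[k] :: (moved.reverse ++ l2) = (moved ++ [l1[k]]).reverse ++ l2 := by
        simp
      rw [h1, h2, harg2]
      exact ih (moved ++ [l1[k]]) (by omega)

-- ===== VERDICT (by name: the statement is the Claim_ definition above) =====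
theorem balance_lines_py_spec : Claim_equal_balance_lines_py := by
  intro l1 l2 _
  unfold Spec_balance_lines_py balance_lines_py balance_lines_py_alt
  have h := loop_eq l1 l2 l1.length [] (le_refl _)
  simp only [List.take_length, List.reverse_nil, List.nil_append] at h
  rw [h, pvL_eq l1, pvL_eq l2]
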